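-- pv_equiv track=rewrite | github.com/Rlemons12/au_cetac_maint | modules/search/models/search_models.py | _extract_entities_from_groups
-- ===== SOURCE A (Python) =====
-- from typing import Dict, Any, Optional
--
-- def _extract_entities_from_groups(pattern_analysis: Dict, captured_groups: list, user_query: str) -> Dict[
--     str, Any]:
--     """Extract semantic entities from regex capture groups."""
--
--     entities = {}
--     expected_entities = pattern_analysis.get('expected_entities', [])
--     pattern_type = pattern_analysis.get('pattern_type', 'unknown')
--
--     # Map captured groups to expected entities based on pattern type
--     if pattern_type == 'part_number_search' and captured_groups:
--         entities['part_number'] = captured_groups[0]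
--
--     elif pattern_type == 'manufacturer_equipment_search' and len(captured_groups) >= 2:
--         entities['equipment_type'] = captured_groups[0]
--         entities['manufacturer'] = captured_groups[1]
--
--     elif pattern_type == 'availability_query' and len(captured_groups) >= 2:
--         entities['equipment_type'] = captured_groups[0]
--         entities['manufacturer'] = captured_groups[1]
--
--     elif pattern_type == 'safety_procedure_query' and captured_groups:
--         entities['procedure_or_equipment'] = captured_groups[0]
--
--     elif captured_groups:
--         # Fallback: use first capture as main entity
--         entities['main_entity'] = captured_groups[0]
--         if len(captured_groups) > 1:
--             entities['secondary_entity'] = captured_groups[1]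
--
--     # Clean up extracted entities
--     for key, value in entities.items():
--         if isinstance(value, str):
--             entities[key] = value.strip()
--
--     return entities
-- ===== SOURCE B (Python) =====
-- _SPECS = {
--     'part_number_search': [('part_number', 0)],
--     'manufacturer_equipment_search': [('equipment_type', 0), ('manufacturer', 1)],
--     'availability_query': [('equipment_type', 0), ('manufacturer', 1)],
--     'safety_procedure_query': [('procedure_or_equipment', 0)],
-- }
--
--
-- def _extract_entities_from_groups(pattern_analysis, captured_groups, user_query):
--     """Extract semantic entities from regex capture groups (dispatch-table version)."""
--     spec = _SPECS.get(pattern_analysis.get('pattern_type', 'unknown'))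
--     if spec is not None and len(captured_groups) > max(i for _, i in spec):
--         return {name: captured_groups[i].strip() for name, i in spec}
--     # generic fallback: first (and second) capture
--     if not captured_groups:
--         return {}
--     entities = {'main_entity': captured_groups[0].strip()}
--     if len(captured_groups) > 1:
--         entities['secondary_entity'] = captured_groups[1].strip()
--     return entities
-- ===== Notes on version B (the rewrite author's own statement) =====
-- stated objective: simpler
-- what changed: Replaces A's five-way if/elif chain plus a post-hoc strip loop with a data-driven dispatch table mapping pattern_type to (entity_name, group_index) pairs, stripping as entities are built, with a shared generic fallback.
import Mathlib
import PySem

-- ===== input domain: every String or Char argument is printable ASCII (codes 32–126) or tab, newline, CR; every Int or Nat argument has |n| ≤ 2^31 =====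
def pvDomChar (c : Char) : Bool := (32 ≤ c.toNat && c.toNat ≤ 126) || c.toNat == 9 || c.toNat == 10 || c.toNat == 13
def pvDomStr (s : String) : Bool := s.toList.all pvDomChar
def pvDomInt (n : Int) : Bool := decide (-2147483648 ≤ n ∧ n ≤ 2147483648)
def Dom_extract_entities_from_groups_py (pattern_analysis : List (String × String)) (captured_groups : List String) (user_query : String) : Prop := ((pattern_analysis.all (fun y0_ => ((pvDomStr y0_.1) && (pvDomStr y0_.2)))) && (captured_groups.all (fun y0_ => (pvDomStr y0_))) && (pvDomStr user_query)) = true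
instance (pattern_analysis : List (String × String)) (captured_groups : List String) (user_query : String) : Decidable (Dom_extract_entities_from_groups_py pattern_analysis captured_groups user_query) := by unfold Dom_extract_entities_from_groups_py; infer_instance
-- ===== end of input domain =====

-- B replaces A's if/elif entity-mapping chain and trailing strip loop with a
-- dispatch table from pattern_type to (entity name, group index) pairs; same results, simpler.


-- ===== PORT A =====
def extract_entities_from_groups_py (pattern_analysis : List (String × String)) (captured_groups : List String) (user_query : String) : List (String × String) :=
  let entities : List (String × String) := []
  let _expected_entities := PySem.Dict.get? (PySem.Dict.mk pattern_analysis) "expected_entities"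
  let pattern_type := PySem.Dict.getD (PySem.Dict.mk pattern_analysis) "pattern_type" "unknown"
  let entities :=
    if pattern_type = "part_number_search" ∧ captured_groups ≠ [] then
      entities ++ [("part_number", PySem.List.pyGetD captured_groups 0 "")]
    else if pattern_type = "manufacturer_equipment_search" ∧ 2 ≤ captured_groups.length then
      entities ++ [("equipment_type", PySem.List.pyGetD captured_groups 0 ""),
                   ("manufacturer", PySem.List.pyGetD captured_groups 1 "")]
    else if pattern_type = "availability_query" ∧ 2 ≤ captured_groups.length then
      entities ++ [("equipment_type", PySem.List.pyGetD captured_groups 0 ""),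
                   ("manufacturer", PySem.List.pyGetD captured_groups 1 "")]
    else if pattern_type = "safety_procedure_query" ∧ captured_groups ≠ [] then
      entities ++ [("procedure_or_equipment", PySem.List.pyGetD captured_groups 0 "")]
    else if captured_groups ≠ [] then
      let entities := entities ++ [("main_entity", PySem.List.pyGetD captured_groups 0 "")]
      if 1 < captured_groups.length then
        entities ++ [("secondary_entity", PySem.List.pyGetD captured_groups 1 "")]
      else entities
    else entities
  -- cleanup loop: every value is a str, each key is reassigned in place → map over the items
  entities.map (fun kv => (kv.1, PySem.Str.strip kv.2))

-- ===== PORT B =====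
def pvSpecs : List (String × List (String × Nat)) :=
  [("part_number_search", [("part_number", 0)]),
   ("manufacturer_equipment_search", [("equipment_type", 0), ("manufacturer", 1)]),
   ("availability_query", [("equipment_type", 0), ("manufacturer", 1)]),
   ("safety_procedure_query", [("procedure_or_equipment", 0)])]

def pvFallback (captured_groups : List String) : List (String × String) :=
  match captured_groups with
  | [] => []
  | [a] => [("main_entity", PySem.Str.strip a)]
  | a :: b :: _ => [("main_entity", PySem.Str.strip a), ("secondary_entity", PySem.Str.strip b)]

def extract_entities_from_groups_py_alt (pattern_analysis : List (String × String)) (captured_groups : List String) (user_query : String) : List (String × String) :=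
  match PySem.Dict.get? (PySem.Dict.mk pvSpecs)
          (PySem.Dict.getD (PySem.Dict.mk pattern_analysis) "pattern_type" "unknown") with
  | some spec =>
    if (spec.map Prod.snd).foldl max 0 < captured_groups.length then
      spec.map (fun ni => (ni.1, PySem.Str.strip (captured_groups.getD ni.2 "")))
    else pvFallback captured_groups
  | none => pvFallback captured_groups

-- ===== PRECONDITION & SPEC =====
def Spec_extract_entities_from_groups_py (pattern_analysis : List (String × String)) (captured_groups : List String) (user_query : String) (out : List (String × String)) : Prop := out = extract_entities_from_groups_py_alt pattern_analysis captured_groups user_query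
instance (pattern_analysis : List (String × String)) (captured_groups : List String) (user_query : String) (out : List (String × String)) : Decidable (Spec_extract_entities_from_groups_py pattern_analysis captured_groups user_query out) := by unfold Spec_extract_entities_from_groups_py; infer_instance

-- ===== CLAIM (what is proved, stated in full; the proofs are below) =====
def Claim_equal_extract_entities_from_groups_py : Prop := ∀ (pattern_analysis : List (String × String)) (captured_groups : List String) (user_query : String), Dom_extract_entities_from_groups_py pattern_analysis captured_groups user_query → Spec_extract_entities_from_groups_py pattern_analysis captured_groups user_query (extract_entities_from_groups_py pattern_analysis captured_groups user_query)

-- ===== LEMMAS AND PROOFS =====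

lemma pv_key (pt : String) (cg : List String) :
    (if pt = "part_number_search" ∧ cg ≠ [] then
      [("part_number", PySem.List.pyGetD cg 0 "")]
    else if pt = "manufacturer_equipment_search" ∧ 2 ≤ cg.length then
      [("equipment_type", PySem.List.pyGetD cg 0 ""), ("manufacturer", PySem.List.pyGetD cg 1 "")]
    else if pt = "availability_query" ∧ 2 ≤ cg.length then
      [("equipment_type", PySem.List.pyGetD cg 0 ""), ("manufacturer", PySem.List.pyGetD cg 1 "")]
    else if pt = "safety_procedure_query" ∧ cg ≠ [] then
      [("procedure_or_equipment", PySem.List.pyGetD cg 0 "")]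
    else if cg ≠ [] then
      (let e := [("main_entity", PySem.List.pyGetD cg 0 "")]
       if 1 < cg.length then e ++ [("secondary_entity", PySem.List.pyGetD cg 1 "")] else e)
    else ([] : List (String × String))).map (fun kv => (kv.1, PySem.Str.strip kv.2))
    =
    (match PySem.Dict.get? (PySem.Dict.mk pvSpecs) pt with
     | some spec =>
       if (spec.map Prod.snd).foldl max 0 < cg.length then
         spec.map (fun ni => (ni.1, PySem.Str.strip (cg.getD ni.2 "")))
       else pvFallback cg
     | none => pvFallback cg) := by
  have hfb : ∀ l : List String,
      (if l ≠ [] then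
        (let e := [("main_entity", PySem.List.pyGetD l 0 "")]
         if 1 < l.length then e ++ [("secondary_entity", PySem.List.pyGetD l 1 "")] else e)
      else ([] : List (String × String))).map (fun kv => (kv.1, PySem.Str.strip kv.2))
      = pvFallback l := by
    intro l
    match l with
    | [] => rfl
    | [a] => simp [pvFallback, PySem.List.pyGetD]
    | a :: b :: t =>
      have hnn : (0:Int) ≤ (t.length:Int) + 1 := by positivity
      simp [pvFallback, PySem.List.pyGetD, PySem.List.pyGet?, PySem.List.pyIdx?, hnn]
  by_cases h1 : pt = "part_number_search"
  · subst h1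
    rcases cg with _ | ⟨a, t⟩
    · rfl
    · simp [PySem.Dict.get?, pvSpecs, List.getD]
  by_cases h2 : pt = "manufacturer_equipment_search"
  · subst h2
    rcases cg with _ | ⟨a, _ | ⟨b, t⟩⟩
    · simp [PySem.Dict.get?, pvSpecs, pvFallback]
    · simp [PySem.Dict.get?, pvSpecs, pvFallback, PySem.List.pyGetD]
    · have hnn : (0:Int) ≤ (t.length:Int) + 1 := by positivity
      simp [PySem.Dict.get?, pvSpecs, List.getD, PySem.List.pyGetD, PySem.List.pyGet?, PySem.List.pyIdx?, hnn]
  by_cases h3 : pt = "availability_query"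
  · subst h3
    rcases cg with _ | ⟨a, _ | ⟨b, t⟩⟩
    · simp [PySem.Dict.get?, pvSpecs, pvFallback]
    · simp [PySem.Dict.get?, pvSpecs, pvFallback, PySem.List.pyGetD]
    · have hnn : (0:Int) ≤ (t.length:Int) + 1 := by positivity
      simp [PySem.Dict.get?, pvSpecs, List.getD, PySem.List.pyGetD, PySem.List.pyGet?, PySem.List.pyIdx?, hnn]
  by_cases h4 : pt = "safety_procedure_query"
  · subst h4
    rcases cg with _ | ⟨a, t⟩
    · rfl
    · simp [PySem.Dict.get?, pvSpecs, List.getD]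
  · have : PySem.Dict.get? (PySem.Dict.mk pvSpecs) pt = none := by
      simp [PySem.Dict.get?, pvSpecs]
      exact ⟨Ne.symm h1, Ne.symm h2, Ne.symm h3, Ne.symm h4⟩
    simp only [h1, h2, h3, h4, false_and, if_false, this]
    exact hfb cg

-- ===== VERDICT (by name: the statement is the Claim_ definition above) =====
theorem extract_entities_from_groups_py_spec : Claim_equal_extract_entities_from_groups_py := by
  intro pa cg uq _
  unfold Spec_extract_entities_from_groups_py extract_entities_from_groups_py extract_entities_from_groups_py_alt
  simp only []
  exact pv_key _ cg
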